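-- pv_equiv track=rewrite | github.com/james5635/GeekForGeek-Data-Structure-and-Algorithm | sorting/hard/min_subsets_consecutive/solution.py | min_subsets_consecutive_hash
-- ===== SOURCE A (Python) =====
-- from collections import Counter
--
-- def min_subsets_consecutive_hash(arr):
--     """
--     Count minimum subsets using hash map.
--     Works without sorting but uses extra space.
--
--     Args:
--         arr: Input array
--
--     Returns:
--         int: Minimum number of subsets
--     """
--     if not arr:
--         return 0
--
--     freq = Counter(arr)
--     elements = sorted(freq.keys())
--
--     subsets = 1
--     for i in range(1, len(elements)):
--         if elements[i] != elements[i - 1] + 1: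
--             subsets += 1
--
--     return subsets
-- ===== SOURCE B (Python) =====
-- def min_subsets_consecutive_hash(arr):
--     """Count minimum subsets of consecutive integers: O(n) hash-set pass
--     counting group starts (elements x with x-1 absent)."""
--     s = set(arr)
--     return sum(1 for x in s if x - 1 not in s)
-- ===== Notes on version B (the rewrite author's own statement) =====
-- stated objective: faster
-- what changed: Replaces Counter + sort + adjacent-pair scan with a single hash set and a count of group starts (elements x with x-1 not in the set), removing the sort.
import Mathlib
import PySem

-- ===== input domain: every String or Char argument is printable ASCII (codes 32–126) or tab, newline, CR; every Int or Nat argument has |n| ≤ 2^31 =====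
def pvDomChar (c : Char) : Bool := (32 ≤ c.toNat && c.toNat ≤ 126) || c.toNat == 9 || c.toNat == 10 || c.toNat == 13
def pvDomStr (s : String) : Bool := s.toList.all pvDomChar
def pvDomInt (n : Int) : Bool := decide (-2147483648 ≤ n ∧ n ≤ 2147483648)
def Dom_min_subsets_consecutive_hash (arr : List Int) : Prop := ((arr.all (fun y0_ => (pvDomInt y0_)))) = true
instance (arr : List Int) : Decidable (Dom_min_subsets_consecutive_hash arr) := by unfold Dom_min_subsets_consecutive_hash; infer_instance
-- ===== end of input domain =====

-- B replaces A's Counter + sort + adjacent-pair scan by one hash set and a count of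
-- group starts (x with x-1 absent): O(n) instead of O(n log n).

-- ===== PORT A =====
def min_subsets_consecutive_hash (arr : List Int) : Int :=
  if arr = [] then 0
  else
    let freq := PySem.Dict.counter arr
    let elements := PySem.List.sorted freq.keys (fun x => x) false
    (PySem.List.pyRange 1 (elements.length : Int) 1).foldl
      (fun subsets i =>
        if PySem.List.pyGetD elements i 0 ≠ PySem.List.pyGetD elements (i - 1) 0 + 1
        then subsets + 1 else subsets) 1

-- ===== PORT B =====
def min_subsets_consecutive_hash_alt (arr : List Int) : Int :=
  let s : PySem.Set Int := PySem.Set.ofList arr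
  ((s.countP (fun x => !(PySem.Set.contains s (x - 1)))) : Int)

-- ===== PRECONDITION & SPEC =====
def Spec_min_subsets_consecutive_hash (arr : List Int) (out : Int) : Prop := out = min_subsets_consecutive_hash_alt arr
instance (arr : List Int) (out : Int) : Decidable (Spec_min_subsets_consecutive_hash arr out) := by unfold Spec_min_subsets_consecutive_hash; infer_instance

-- ===== CLAIM (what is proved, stated in full; the proofs are below) =====
def Claim_equal_min_subsets_consecutive_hash : Prop := ∀ (arr : List Int), Dom_min_subsets_consecutive_hash arr → Spec_min_subsets_consecutive_hash arr (min_subsets_consecutive_hash arr)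

-- ===== LEMMAS AND PROOFS =====

-- Core: on a strictly increasing nonempty list, the number of elements whose
-- predecessor is absent equals 1 + the number of non-consecutive adjacent pairs.
theorem pvCore (L : List Int) (hp : L.Pairwise (· < ·)) (hne : L ≠ []) :
    L.countP (fun x => decide (x - 1 ∉ L)) =
    (List.range (L.length - 1)).countP
      (fun k => decide (L.getD (k + 1) 0 ≠ L.getD k 0 + 1)) + 1 := by
  induction L with
  | nil => exact absurd rfl hne
  | cons a t ih =>
    cases t with
    | nil => simp
    | cons b t' =>
      obtain ⟨ha, hp'⟩ := List.pairwise_cons.mp hp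
      obtain ⟨hb, _⟩ := List.pairwise_cons.mp hp'
      have hab : a < b := ha b List.mem_cons_self
      have IH := ih hp' (List.cons_ne_nil _ _)
      -- the index-based count peels its first index
      have hrange : (List.range ((a :: b :: t').length - 1)).countP
            (fun k => decide ((a :: b :: t').getD (k + 1) 0 ≠ (a :: b :: t').getD k 0 + 1))
          = (if b = a + 1 then 0 else 1) +
            (List.range ((b :: t').length - 1)).countP
              (fun k => decide ((b :: t').getD (k + 1) 0 ≠ (b :: t').getD k 0 + 1)) := by
        simp only [List.length_cons, Nat.add_sub_cancel]
        rw [List.range_succ_eq_map, List.countP_cons, List.countP_map]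
        have htl : List.countP
              ((fun k => decide ((a :: b :: t').getD (k + 1) 0 ≠ (a :: b :: t').getD k 0 + 1)) ∘ Nat.succ)
              (List.range t'.length)
            = List.countP (fun k => decide ((b :: t').getD (k + 1) 0 ≠ (b :: t').getD k 0 + 1))
              (List.range t'.length) := by
          apply List.countP_congr
          intro k hk
          simp [Function.comp]
        rw [htl]
        rcases eq_or_ne b (a + 1) with hc | hc <;> simp [hc, Nat.add_comm]
      -- the head a always starts a group
      have hmem_a : (a - 1) ∉ a :: b :: t' := by
        intro hm
        rcases List.mem_cons.mp hm with h1 | h2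
        · omega
        · exact absurd (ha _ h2) (by omega)
      -- deep elements never have predecessor a
      have htcnt : t'.countP (fun x => decide (x - 1 ∉ a :: b :: t'))
          = t'.countP (fun x => decide (x - 1 ∉ b :: t')) := by
        apply List.countP_congr
        intro x hx
        have hbx : b < x := hb x hx
        simp only [List.mem_cons, decide_eq_true_eq]
        constructor
        · intro h hm; exact h (Or.inr hm)
        · intro h hm
          rcases hm with h1 | h2
          · omega
          · exact h h2
      have hb1 : (b - 1) ∉ b :: t' := by
        intro hm
        rcases List.mem_cons.mp hm with h1 | h2
        · omega
        · exact absurd (hb _ h2) (by omega)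
      have ePa : (if (decide ((a : Int) - 1 ∉ a :: b :: t')) = true then 1 else 0) = 1 := by
        simp [hmem_a]
      have ePb' : (if (decide ((b : Int) - 1 ∉ b :: t')) = true then 1 else 0) = 1 := by
        simp [hb1]
      rw [List.countP_cons, List.countP_cons, htcnt, ePa, hrange]
      rw [List.countP_cons, ePb'] at IH
      rcases eq_or_ne b (a + 1) with hc | hc
      · have hbmem : (b - 1) ∈ a :: b :: t' := by simp [hc]
        have ePb : (if (decide ((b : Int) - 1 ∉ a :: b :: t')) = true then 1 else 0) = 0 := by
          simp [hbmem]
        rw [ePb, if_pos hc]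
        omega
      · have hbmem : (b - 1) ∉ a :: b :: t' := by
          intro hm
          rcases List.mem_cons.mp hm with h1 | h2
          · omega
          · exact hb1 h2
        have ePb : (if (decide ((b : Int) - 1 ∉ a :: b :: t')) = true then 1 else 0) = 1 := by
          simp [hbmem]
        rw [ePb, if_neg hc]
        omega

theorem min_subsets_consecutive_hash_spec : Claim_equal_min_subsets_consecutive_hash := by
  intro arr _
  unfold Spec_min_subsets_consecutive_hash min_subsets_consecutive_hash min_subsets_consecutive_hash_alt
  by_cases h : arr = []
  · subst h; rfl
  · rw [if_neg h]
    simp only [PySem.Dict.keys_counter]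
    set s : PySem.Set Int := PySem.Set.ofList arr with hs
    set L : List Int := PySem.List.sorted s (fun x => x) false with hL
    have hperm : L.Perm s := PySem.List.sorted_perm s (fun x => x) false
    have hLne : L ≠ [] := by
      rw [hL, Ne, PySem.List.sorted_eq_nil_iff]
      cases arr with
      | nil => exact absurd rfl h
      | cons a t => intro hnil; have := (PySem.Set.mem_ofList (a :: t) a).mpr (List.mem_cons_self) ; rw [hs] at hnil; simp [hnil] at this
    -- B side
    have hB : s.countP (fun x => !(PySem.Set.contains s (x - 1)))
        = L.countP (fun x => decide (x - 1 ∉ L)) := by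
      rw [← hperm.countP_eq]
      apply List.countP_congr
      intro x hx
      simp [hperm.mem_iff]
    -- A side
    rw [PySem.List.foldl_ite_add_one]
    rw [PySem.List.pyRange_one]
    have hcast : (((L.length : Int) - 1)).toNat = L.length - 1 := by omega
    rw [hcast, List.countP_map]
    have hcnt : List.countP
        ((fun i => decide (PySem.List.pyGetD L i 0 ≠ PySem.List.pyGetD L (i - 1) 0 + 1)) ∘ (fun (k : Nat) => (1 : Int) + (↑k : Int))) (List.range (L.length - 1))
        = (List.range (L.length - 1)).countP (fun k => decide (L.getD (k + 1) 0 ≠ L.getD k 0 + 1)) := by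
      apply List.countP_congr
      intro k hk
      have h1 : (1 : Int) + (k : Int) = ((k + 1 : Nat) : Int) := by push_cast; ring
      have h2 : ((k + 1 : Nat) : Int) - 1 = ((k : Nat) : Int) := by push_cast; ring
      simp only [Function.comp, h1, h2, PySem.List.pyGetD_natCast]
    rw [hcnt, hB, pvCore L (PySem.List.sorted_ofList_pairwise_lt arr) hLne]
    push_cast
    ring
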